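-- pv_equiv track=rewrite | github.com/Sibght/Last-Mile-Delivery-Optimization | .ipynb_checkpoints/AdvancedVRP-checkpoint.py | cluster_deliveries
-- ===== SOURCE A (Python) =====
-- def cluster_deliveries(indices, k=10):
--     chunk_size = max(1, len(indices)//k)
--     clusters = []
--     current = []
--     for idx in indices:
--         current.append(idx)
--         if len(current) >= chunk_size:
--             clusters.append(current)
--             current = []
--     if current:
--         clusters.append(current)
--     while len(clusters) > k:
--         clusters[-2].extend(clusters[-1])
--         clusters.pop()
--     return clusters
-- ===== SOURCE B (Python) =====
-- def cluster_deliveries(indices, k=10):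
--     if k < 1:
--         raise ValueError("k must be a positive cluster count")
--     n = len(indices)
--     chunk_size = max(1, n // k)
--     num_chunks = -(-n // chunk_size)  # ceil(n / chunk_size)
--     if num_chunks > k:
--         head = [list(indices[i * chunk_size:(i + 1) * chunk_size]) for i in range(k - 1)]
--         return head + [list(indices[(k - 1) * chunk_size:])]
--     return [list(indices[i:i + chunk_size]) for i in range(0, n, chunk_size)]
-- ===== Notes on version B (the rewrite author's own statement) =====
-- stated objective: simpler
-- what changed: Replaces A's element-by-element accumulate loop plus destructive merge-and-pop while loop with a closed-form boundary computation: the chunk count is computed arithmetically and the result is built directly from slices (first k-1 fixed slices plus one tail slice when the count exceeds k, otherwise all equal slices).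
import Mathlib
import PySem

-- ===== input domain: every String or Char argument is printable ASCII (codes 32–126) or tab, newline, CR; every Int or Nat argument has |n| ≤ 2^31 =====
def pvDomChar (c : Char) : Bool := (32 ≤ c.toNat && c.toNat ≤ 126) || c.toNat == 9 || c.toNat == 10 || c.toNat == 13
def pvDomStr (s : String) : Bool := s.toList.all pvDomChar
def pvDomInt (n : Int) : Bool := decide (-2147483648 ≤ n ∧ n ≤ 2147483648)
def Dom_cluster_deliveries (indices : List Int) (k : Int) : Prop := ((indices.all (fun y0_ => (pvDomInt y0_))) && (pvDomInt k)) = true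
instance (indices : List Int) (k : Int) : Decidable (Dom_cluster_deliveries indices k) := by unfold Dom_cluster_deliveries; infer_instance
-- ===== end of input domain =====

-- B replaces A's accumulate loop + merge-and-pop while loop by a closed-form chunk count and direct slices (objective: simpler).

-- ===== PORT A =====
-- Python's 'while len(clusters) > k: clusters[-2].extend(clusters[-1]); clusters.pop()'.
-- The '_' fallback is the case where Python raises IndexError (fewer than 2 clusters), excluded by Pre_.
-- fuel = the initial list length: each iteration shortens the list by one, so it suffices.
-- When fewer than 2 clusters remain with the condition still true, Python raises IndexError
-- (k < 0, excluded by Pre_); the 'else clusters' there is never claimed about.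
def pyMergeLoop (fuel : Nat) (k : Int) (clusters : List (List Int)) : List (List Int) :=
  match fuel with
  | 0 => clusters
  | fuel + 1 =>
    if ((clusters.length : Int) > k) then
      if 2 ≤ clusters.length then
        pyMergeLoop fuel k (clusters.take (clusters.length - 2) ++
          [clusters.getD (clusters.length - 2) [] ++ clusters.getD (clusters.length - 1) []])
      else clusters
    else clusters

def cluster_deliveries (indices : List Int) (k : Int) : List (List Int) :=
  let chunk_size : Int := max 1 (PySem.Int.floordiv (indices.length : Int) k)
  let st := indices.foldl
    (fun (st : List (List Int) × List Int) idx =>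
      let current := st.2 ++ [idx]
      if chunk_size ≤ (current.length : Int) then (st.1 ++ [current], ([] : List Int))
      else (st.1, current))
    ([], [])
  let clusters := if st.2 = [] then st.1 else st.1 ++ [st.2]
  pyMergeLoop clusters.length k clusters

-- ===== PORT B =====
-- Source B raises ValueError for k < 1; that raising branch has no value and is excluded by Pre_
-- (the [] returned here is never claimed about).
def cluster_deliveries_alt (indices : List Int) (k : Int) : List (List Int) :=
  if k < 1 then []
  else
    let n : Int := (indices.length : Int)
    let chunk_size : Int := max 1 (PySem.Int.floordiv n k)
    let num_chunks : Int := -(PySem.Int.floordiv (-n) chunk_size)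
    if num_chunks > k then
      (PySem.List.pyRange 0 (k - 1) 1).map
        (fun i => PySem.List.slice indices (some (i * chunk_size)) (some ((i + 1) * chunk_size)))
      ++ [PySem.List.slice indices (some ((k - 1) * chunk_size)) none]
    else
      (PySem.List.pyRange 0 n chunk_size).map
        (fun i => PySem.List.slice indices (some i) (some (i + chunk_size)))

-- ===== PRECONDITION & SPEC =====
-- Pre_ excludes exactly the k on which Python A raises: k = 0 (ZeroDivisionError) and k < 0
-- (IndexError in the merge loop); B raises ValueError on those same inputs.
def Pre_cluster_deliveries (indices : List Int) (k : Int) : Prop := 1 ≤ k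
instance (indices : List Int) (k : Int) : Decidable (Pre_cluster_deliveries indices k) := by unfold Pre_cluster_deliveries; infer_instance

def pvWitness_cluster_deliveries : List Int × Int := ([1, 2, 3], 2)

def Spec_cluster_deliveries (indices : List Int) (k : Int) (out : List (List Int)) : Prop := out = cluster_deliveries_alt indices k
instance (indices : List Int) (k : Int) (out : List (List Int)) : Decidable (Spec_cluster_deliveries indices k out) := by unfold Spec_cluster_deliveries; infer_instance

-- ===== CLAIM (what is proved, stated in full; the proofs are below) =====
def Claim_equal_cluster_deliveries : Prop := ∀ (indices : List Int) (k : Int), Dom_cluster_deliveries indices k → Pre_cluster_deliveries indices k → Spec_cluster_deliveries indices k (cluster_deliveries indices k)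

-- ===== LEMMAS AND PROOFS =====

-- canonical chunking: successive blocks of cs elements
def chunks (cs : Nat) (l : List Int) : List (List Int) :=
  if _h : l = [] ∨ cs = 0 then [] else l.take cs :: chunks cs (l.drop cs)
termination_by l.length
decreasing_by
  rcases not_or.mp _h with ⟨h1, h2⟩
  have : 0 < l.length := List.length_pos_iff.mpr h1
  simp [List.length_drop]; omega

theorem chunks_nil (cs : Nat) : chunks cs [] = [] := by
  rw [chunks]; simp

theorem chunks_cons (cs : Nat) (l : List Int) (h1 : l ≠ []) (h2 : cs ≠ 0) :
    chunks cs l = l.take cs :: chunks cs (l.drop cs) := by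
  rw [chunks]; simp [h1, h2]

theorem chunks_flatten (cs : Nat) (l : List Int) (h : cs ≠ 0) : (chunks cs l).flatten = l := by
  by_cases h1 : l = []
  · simp [h1, chunks_nil]
  · rw [chunks_cons cs l h1 h]
    have ih := chunks_flatten cs (l.drop cs) h
    simp [ih]
termination_by l.length
decreasing_by
  have : 0 < l.length := List.length_pos_iff.mpr h1
  simp [List.length_drop]; omega

theorem chunks_bounds (cs : Nat) (l : List Int) (h : 1 ≤ cs) :
    (((chunks cs l).length : Int) - 1) * cs < l.length ∧
      (l.length : Int) ≤ ((chunks cs l).length : Int) * cs := by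
  by_cases h1 : l = []
  · simp [h1, chunks_nil]
    omega
  · rw [chunks_cons cs l h1 (by omega)]
    have hlp : 0 < l.length := List.length_pos_iff.mpr h1
    by_cases hlc : cs ≤ l.length
    · have ih := chunks_bounds cs (l.drop cs) h
      simp only [List.length_cons, List.length_drop] at ih ⊢
      rw [Nat.cast_sub hlc] at ih
      push_cast at ih ⊢
      constructor <;> nlinarith [ih.1, ih.2]
    · have hdrop : l.drop cs = [] := List.drop_eq_nil_iff.mpr (by omega)
      rw [hdrop, chunks_nil]
      simp only [List.length_cons, List.length_nil]
      push_cast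
      constructor <;> omega
termination_by l.length
decreasing_by
  have : 0 < l.length := List.length_pos_iff.mpr h1
  simp [List.length_drop]; omega

-- Phase 1 of A (the for loop plus the final 'if current') produces exactly the chunks.
theorem phase1_eq_chunks (cs : Int) (hcs : 1 ≤ cs) (l : List Int)
    (cl : List (List Int)) (cur : List Int) (hcur : (cur.length : Int) < cs) :
    (let st := l.foldl
        (fun (st : List (List Int) × List Int) idx =>
          let current := st.2 ++ [idx]
          if cs ≤ (current.length : Int) then (st.1 ++ [current], ([] : List Int))
          else (st.1, current))
        (cl, cur)
      if st.2 = [] then st.1 else st.1 ++ [st.2]) = cl ++ chunks cs.toNat (cur ++ l) := by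
  induction l generalizing cl cur with
  | nil =>
    simp only [List.foldl_nil, List.append_nil]
    by_cases hc : cur = []
    · simp [hc, chunks_nil]
    · have h2 : cs.toNat ≠ 0 := by omega
      rw [chunks_cons cs.toNat cur hc h2]
      have htake : cur.take cs.toNat = cur := List.take_of_length_le (by omega)
      have hdrop : cur.drop cs.toNat = [] := List.drop_eq_nil_of_le (by omega)
      simp [hc, htake, hdrop, chunks_nil]
  | cons x t ih =>
    simp only [List.foldl_cons]
    by_cases hfull : cs ≤ ((cur ++ [x]).length : Int)
    · have hlen : ((cur ++ [x]).length : Int) = cs := by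
        simp at hfull ⊢; omega
      simp only [if_pos hfull]
      have ihh := ih (cl ++ [cur ++ [x]]) [] (by simpa using hcs)
      simp only [List.nil_append] at ihh
      rw [ihh]
      have heq : cur ++ x :: t = (cur ++ [x]) ++ t := by simp
      rw [heq, chunks_cons cs.toNat ((cur ++ [x]) ++ t) (by simp) (by omega)]
      have hl2 : (cur ++ [x]).length = cs.toNat := by
        have := hlen; omega
      have htake : ((cur ++ [x]) ++ t).take cs.toNat = cur ++ [x] := by
        rw [List.take_append_of_le_length (by omega)]
        exact List.take_of_length_le (by omega)
      have hdrop : ((cur ++ [x]) ++ t).drop cs.toNat = t := by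
        rw [List.drop_append_of_le_length (by omega)]
        simp [hl2]
      rw [htake, hdrop]; simp
    · simp only [if_neg hfull]
      have ihh := ih cl (cur ++ [x]) (by push_neg at hfull; exact hfull)
      rw [ihh]; simp

-- The merge loop turns a too-long cluster list into k-1 untouched clusters plus one merged tail.
theorem pyMergeLoop_of_le (fuel : Nat) (k : Int) (cl : List (List Int))
    (h : ¬ ((cl.length : Int) > k)) :
    pyMergeLoop fuel k cl = cl := by
  cases fuel <;> simp [pyMergeLoop, h]

theorem pyMergeLoop_eq_aux (fuel : Nat) : ∀ (k : Int), 1 ≤ k → ∀ (cl : List (List Int)),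
    cl.length ≤ fuel + k.toNat → (cl.length : Int) > k →
    pyMergeLoop fuel k cl = cl.take (k.toNat - 1) ++ [(cl.drop (k.toNat - 1)).flatten] := by
  induction fuel with
  | zero =>
    intro k hk cl hle h
    exfalso
    omega
  | succ N ihN =>
    intro k hk cl hle h
    have hlen2 : 2 ≤ cl.length := by
      have : (2 : Int) ≤ (cl.length : Int) := by omega
      exact_mod_cast this
    obtain ⟨init, prev, last, hcl⟩ : ∃ init prev last, cl = init ++ [prev, last] := by
      rcases hl : cl.reverse with _ | ⟨a, _ | ⟨b, r⟩⟩
      · exfalso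
        have : cl.reverse.length = 0 := by rw [hl]; rfl
        rw [List.length_reverse] at this
        omega
      · exfalso
        have : cl.reverse.length = 1 := by rw [hl]; rfl
        rw [List.length_reverse] at this
        omega
      · refine ⟨r.reverse, b, a, ?_⟩
        have := congrArg List.reverse hl
        simpa using this
    subst hcl
    have hinitlen : (init ++ [prev, last]).length = init.length + 2 := by simp
    simp only [pyMergeLoop]
    rw [if_pos h, if_pos hlen2]
    have e1 : (init ++ [prev, last]).length - 2 = init.length := by simp
    have e2 : (init ++ [prev, last]).length - 1 = init.length + 1 := by simp
    simp only [e1, e2]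
    have hget1 : (init ++ [prev, last]).getD init.length [] = prev := by
      rw [List.getD_eq_getElem?_getD, List.getElem?_append_right (Nat.le_refl _)]
      simp
    have hget2 : (init ++ [prev, last]).getD (init.length + 1) [] = last := by
      rw [List.getD_eq_getElem?_getD, List.getElem?_append_right (Nat.le_succ_of_le (Nat.le_refl _))]
      simp
    have htk : (init ++ [prev, last]).take init.length = init := by
      rw [List.take_append_of_le_length (by omega)]
      simp
    rw [hget1, hget2, htk]
    set new := init ++ [prev ++ last] with hnew
    have hnewlen : new.length = init.length + 1 := by simp [hnew]
    have hkinit : k.toNat - 1 ≤ init.length := by omega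
    by_cases h2 : (new.length : Int) > k
    · have ihle : new.length ≤ N + k.toNat := by
        rw [hnewlen]
        have := hinitlen
        omega
      have ih := ihN k hk new ihle h2
      rw [ih]
      congr 1
      · have t1 : (init ++ [prev ++ last]).take (k.toNat - 1) = init.take (k.toNat - 1) :=
          List.take_append_of_le_length (by omega)
        have t2 : (init ++ [prev, last]).take (k.toNat - 1) = init.take (k.toNat - 1) :=
          List.take_append_of_le_length (by omega)
        rw [hnew, t1, t2]
      · congr 1
        have d1 : (init ++ [prev ++ last]).drop (k.toNat - 1)
            = init.drop (k.toNat - 1) ++ [prev ++ last] :=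
          List.drop_append_of_le_length (by omega)
        have d2 : (init ++ [prev, last]).drop (k.toNat - 1)
            = init.drop (k.toNat - 1) ++ [prev, last] :=
          List.drop_append_of_le_length (by omega)
        rw [hnew, d1, d2]
        simp
    · rw [pyMergeLoop_of_le N k new h2]
      have hkn : k.toNat - 1 = init.length := by omega
      have t3 : (init ++ [prev, last]).take init.length = init := by
        rw [List.take_append_of_le_length (by omega)]
        simp
      have d3 : (init ++ [prev, last]).drop init.length = [prev, last] := by
        rw [List.drop_append_of_le_length (by omega)]
        simp
      rw [hnew, hkn, t3, d3]
      simp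

theorem pyMergeLoop_eq (k : Int) (hk : 1 ≤ k) (cl : List (List Int))
    (h : (cl.length : Int) > k) :
    pyMergeLoop cl.length k cl = cl.take (k.toNat - 1) ++ [(cl.drop (k.toNat - 1)).flatten] :=
  pyMergeLoop_eq_aux cl.length k hk cl (Nat.le_add_right _ _) h


-- range-of-slices = chunks, when the count is the number of chunks
theorem range_map_eq_chunks (csN : Nat) (h : 1 ≤ csN) (m : Nat) (l : List Int)
    (hm : m = (chunks csN l).length) :
    (List.range m).map (fun j => (l.drop (csN * j)).take csN) = chunks csN l := by
  induction m generalizing l with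
  | zero =>
    by_cases h1 : l = []
    · simp [h1, chunks_nil]
    · rw [chunks_cons csN l h1 (by omega)] at hm; simp at hm
  | succ m ih =>
    have h1 : l ≠ [] := by
      intro hl; rw [hl, chunks_nil] at hm; simp at hm
    rw [chunks_cons csN l h1 (by omega)] at hm ⊢
    simp only [List.length_cons] at hm
    rw [List.range_succ_eq_map]
    simp only [List.map_cons, List.map_map]
    have hhead : (l.drop (csN * 0)).take csN = l.take csN := by simp
    rw [hhead]
    congr 1
    rw [← ih (l.drop csN) (by omega)]
    apply List.map_congr_left
    intro j _
    simp only [Function.comp_apply, List.drop_drop]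
    congr 2
    rw [Nat.mul_succ]
    omega

theorem range_map_tail_eq_take_flatten (csN : Nat) (h : 1 ≤ csN) (m : Nat) (l : List Int)
    (hm : m * csN ≤ l.length) :
    (List.range m).map (fun j => (l.drop (csN * j)).take csN) ++ [l.drop (csN * m)]
      = (chunks csN l).take m ++ [((chunks csN l).drop m).flatten] := by
  induction m generalizing l with
  | zero => simp [chunks_flatten csN l (by omega)]
  | succ m ih =>
    have h1 : l ≠ [] := by
      intro hl; rw [hl] at hm; simp at hm; omega
    rw [chunks_cons csN l h1 (by omega)]
    rw [List.range_succ_eq_map]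
    simp only [List.map_cons, List.map_map, List.take_succ_cons, List.drop_succ_cons]
    have hhead : (l.drop (csN * 0)).take csN = l.take csN := by simp
    rw [hhead]
    have hm' : m * csN + csN ≤ l.length := by
      have h' := hm
      rw [Nat.succ_mul] at h'
      omega
    have hih := ih (l.drop csN) (by rw [List.length_drop]; omega)
    rw [List.cons_append, List.cons_append]
    congr 1
    rw [← hih]
    congr 1
    · apply List.map_congr_left
      intro j _
      simp only [Function.comp_apply, List.drop_drop]
      congr 2
      rw [Nat.mul_succ]
      omega
    · congr 1
      rw [List.drop_drop]
      congr 1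
      rw [Nat.mul_succ]
      omega

-- number of chunks as Python's -(-n // cs)
theorem num_chunks_eq (cs : Int) (hcs : 1 ≤ cs) (l : List Int) :
    -(PySem.Int.floordiv (-(l.length : Int)) cs) = ((chunks cs.toNat l).length : Int) := by
  have hb := chunks_bounds cs.toNat l (by omega)
  have hcast : ((cs.toNat : Int)) = cs := by omega
  rw [hcast] at hb
  rw [PySem.Int.neg_floordiv_neg_eq_iff_of_pos (by omega)]
  exact ⟨hb.1, hb.2⟩

-- ===== VERDICT (by name: the statement is the Claim_ definition above) =====
theorem cluster_deliveries_spec : Claim_equal_cluster_deliveries := by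
  intro indices k _hdom hk
  unfold Spec_cluster_deliveries cluster_deliveries cluster_deliveries_alt
  have hk1 : (1 : Int) ≤ k := hk
  rw [if_neg (by omega : ¬ k < 1)]
  dsimp only
  set n : Int := (indices.length : Int) with hn
  set cs : Int := max 1 (PySem.Int.floordiv n k) with hcs
  have hcs1 : 1 ≤ cs := le_max_left _ _
  set csN : Nat := cs.toNat with hcsN
  have hcast : ((csN : Int)) = cs := by omega
  have hcsN1 : 1 ≤ csN := by omega
  -- phase 1 of A
  have hph := phase1_eq_chunks cs hcs1 indices [] [] (by simpa using hcs1)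
  simp only [List.nil_append] at hph
  rw [hph]
  -- number of chunks
  have hnum := num_chunks_eq cs hcs1 indices
  set q : Nat := (chunks csN indices).length with hq
  have hqn : -(PySem.Int.floordiv (-n) cs) = (q : Int) := hnum
  rw [hqn]
  by_cases hgt : (q : Int) > k
  · -- A's merge loop fires; B takes the head-slices + tail-slice branch
    rw [pyMergeLoop_eq k hk1 (chunks csN indices) (by simpa [hq] using hgt)]
    rw [if_pos hgt]
    have hb := chunks_bounds csN indices (by omega)
    rw [hcast] at hb
    rw [← hq] at hb
    have hc1 : ((k.toNat - 1 : Nat) : Int) = k - 1 := by omega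
    have hmn : (k.toNat - 1) * csN ≤ indices.length := by
      have hx : (k - 1) * cs < (indices.length : Int) := by
        have hle : (k - 1) * cs ≤ ((q : Int) - 1) * cs :=
          mul_le_mul_of_nonneg_right (by omega) (by omega)
        exact lt_of_le_of_lt hle hb.1
      have hcastm : (((k.toNat - 1) * csN : Nat) : Int) < (indices.length : Int) := by
        rw [Nat.cast_mul, hc1, hcast]; exact hx
      omega
    rw [← range_map_tail_eq_take_flatten csN hcsN1 (k.toNat - 1) indices hmn]
    -- turn B's pyRange/slice expression into the range/drop/take form
    rw [PySem.List.pyRange_one 0 (k - 1)]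
    simp only [List.map_map, zero_add, sub_zero]
    have hk1N : ((k - 1 : Int)).toNat = k.toNat - 1 := by omega
    rw [hk1N]
    congr 1
    · apply List.map_congr_left
      intro j _
      simp only [Function.comp_apply]
      have e1 : ((j : Int)) * cs = ((csN * j : Nat) : Int) := by
        push_cast [← hcast]; ring
      have e2 : ((j : Int) + 1) * cs = ((csN * j : Nat) : Int) + ((csN : Nat) : Int) := by
        push_cast [← hcast]; ring
      rw [e1, e2, PySem.List.slice_natCast_add]
    · have e3 : (k - 1) * cs = (((k.toNat - 1) * csN : Nat) : Int) := by
        rw [Nat.cast_mul, hc1, hcast]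
      rw [e3, PySem.List.slice_from_natCast]
      congr 1
      ring
  · -- no merging; B returns all slices
    rw [pyMergeLoop_of_le (chunks csN indices).length k (chunks csN indices)
      (by simpa [hq] using hgt)]
    rw [if_neg hgt]
    rw [← range_map_eq_chunks csN hcsN1 q indices rfl]
    rw [PySem.List.pyRange_of_pos 0 n (by omega)]
    simp only [List.map_map, zero_add, sub_zero]
    have hb := chunks_bounds csN indices (by omega)
    rw [hcast] at hb
    rw [← hq] at hb
    have hcnt : (if (0 : Int) < n then ((n + cs - 1) / cs).toNat else 0) = q := by
      by_cases hn0 : (0 : Int) < n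
      · rw [if_pos hn0]
        have hlin : ((q : Int)) * cs = ((q : Int) - 1) * cs + cs := by ring
        have hq0 : (1 : Int) ≤ (q : Int) := by
          by_contra h0
          have hq00 : ((q : Nat) : Int) = 0 := by omega
          have hb2 := hb.2
          rw [hq00, zero_mul] at hb2
          omega
        have h1 : (q : Int) ≤ (n + cs - 1) / cs := by
          rw [Int.le_ediv_iff_mul_le (by omega)]
          have := hb.1; omega
        have h2 : (n + cs - 1) / cs < (q : Int) + 1 := by
          rw [Int.ediv_lt_iff_lt_mul (by omega)]
          have hlin2 : ((q : Int) + 1) * cs = (q : Int) * cs + cs := by ring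
          have := hb.2; omega
        omega
      · rw [if_neg hn0]
        have hn' : n = 0 := by omega
        have : indices = [] := by
          rw [hn] at hn'
          exact List.length_eq_zero_iff.mp (by omega)
        rw [hq, this, chunks_nil]
        simp
    rw [hcnt]
    apply List.map_congr_left
    intro j _
    simp only [Function.comp_apply]
    have e1 : cs * ((j : Int)) = ((csN * j : Nat) : Int) := by
      push_cast [← hcast]; ring
    have e2 : cs * ((j : Int)) + cs = ((csN * j : Nat) : Int) + ((csN : Nat) : Int) := by
      push_cast [← hcast]; ring
    rw [e2, e1, PySem.List.slice_natCast_add]
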